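-- pv_equiv track=rewrite | github.com/minkyunglee1012/ASIAE-6th-Study | Algorithm Study/최희정/4_2주/1641_[aeiou].py | repeat_vowel
-- ===== SOURCE A (Python) =====
-- def repeat_vowel(arr, n):
--
--     result = []
--     arr_len = len(arr)
--
--     # 끝내는 시기 설정
--     if n == 1:
--         return arr
--
--     for i in range(arr_len):
--         val = arr[i]
--
--         # 재귀를 이용하기 위하여
--         # 다음단계 배열을 재조합한다.
--         # 이전 단어는 조합하지 않기위해 i부터 시작함.
--         new_arr = arr[i:]
--
--         # new_arr로 다시 수행, n-1개 요소
--         res_list = repeat_vowel(new_arr, n-1)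
--
--         for iter_val in res_list:
--             result.append(val + iter_val)
--
--     return result
-- ===== SOURCE B (Python) =====
-- def repeat_vowel(arr, n):
--     if n == 1:
--         return arr
--     # enumerate the index-combinations-with-repetition directly (lexicographic),
--     # then flatten each combination into a string
--     def cwr(pool, k):
--         if k == 0:
--             return [[]]
--         if not pool:
--             return []
--         return [[pool[0]] + t for t in cwr(pool, k - 1)] + cwr(pool[1:], k)
--     return [''.join(t) for t in cwr(arr, n)]
-- ===== Notes on version B (the rewrite author's own statement) =====
-- stated objective: alternative
-- what changed: Replaces A's recursion over array suffixes (which appends val+s across levels) by a single helper that enumerates the combinations-with-repetition as lists in the same lexicographic order and joins each once.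
-- outside the precondition, e.g. on repeat_vowel([], 0): A returns [], B returns ['']; on repeat_vowel([], -2): A returns [], B returns []
-- crash fix: For n == 0 with nonempty arr, A raises RecursionError (the n==1 base case is never reached) while B returns [''], the empty product. — e.g. on repeat_vowel(["a"], 0): A raises RecursionError, B returns [""]
import Mathlib
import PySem

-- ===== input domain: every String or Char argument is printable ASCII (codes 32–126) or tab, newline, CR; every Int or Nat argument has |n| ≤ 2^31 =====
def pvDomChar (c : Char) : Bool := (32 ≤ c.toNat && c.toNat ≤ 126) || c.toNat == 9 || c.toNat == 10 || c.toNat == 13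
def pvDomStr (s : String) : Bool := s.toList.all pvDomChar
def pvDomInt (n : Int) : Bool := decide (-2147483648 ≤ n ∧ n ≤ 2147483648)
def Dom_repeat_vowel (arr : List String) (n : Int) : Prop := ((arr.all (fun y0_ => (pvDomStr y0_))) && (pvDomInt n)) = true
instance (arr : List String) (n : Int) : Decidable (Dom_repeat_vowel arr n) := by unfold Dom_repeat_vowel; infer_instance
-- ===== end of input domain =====

-- B enumerates the index combinations once instead of A's recursion over array suffixes; equal output on n ≥ 1 (alternative, not claimed faster).

-- ===== PORT A =====
-- Python A recurses with n decreasing by 1 until n == 1; a Nat fuel (n.toNat) makes the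
-- same recursion total in Lean — for n ≥ 1 the fuel is never exhausted, so the port is
-- exact on Pre_. arr[i] for i ∈ range(len(arr)) is in range, ported as getD; arr[i:] with
-- 0 ≤ i is List.drop (exact, PySem.List.slice_from_natCast).
def repeat_vowelFuel : Nat → List String → Int → List String
  | 0, _, _ => []
  | fuel + 1, arr, n =>
    if n = 1 then arr
    else
      (List.range arr.length).foldl (fun result i =>
        let val := arr.getD i ""
        let new_arr := arr.drop i
        let res_list := repeat_vowelFuel fuel new_arr (n - 1)
        result ++ res_list.map (fun iter_val => val ++ iter_val)) []

def repeat_vowel (arr : List String) (n : Int) : List String :=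
  repeat_vowelFuel n.toNat arr n

-- ===== PORT B =====
-- port of Source B's cwr helper (combinations with repetition, lexicographic in index
-- order); cwr recurses on the int k with k == 0 as base, so a Nat fuel makes the same
-- recursion total — fuel k.toNat + pool.length + 1 is never exhausted where the Python
-- recursion terminates (k ≥ 0, or an empty pool), so the port is exact there.
def pvCwrFuel : Nat → List String → Int → List (List String)
  | 0, _, _ => []
  | f + 1, pool, k =>
    if k = 0 then [[]]
    else
      match pool with
      | [] => []
      | x :: rest =>
          ((pvCwrFuel f (x :: rest) (k - 1)).map (fun t => x :: t)) ++ pvCwrFuel f rest k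

def repeat_vowel_alt (arr : List String) (n : Int) : List String :=
  if n = 1 then arr
  else (pvCwrFuel (n.toNat + arr.length + 1) arr n).map (fun t => PySem.Str.join "" t)

-- ===== PRECONDITION & SPEC =====
-- Pre_ excludes n < 1: there A infinitely recurses (RecursionError) whenever arr is
-- nonempty, and on empty arr returns [] only because its loop never runs (an accident
-- of the implementation); B returns [''] for n == 0 on empty arr and [] for n < 0 on
-- empty arr.
def Pre_repeat_vowel (arr : List String) (n : Int) : Prop := 1 ≤ n
instance (arr : List String) (n : Int) : Decidable (Pre_repeat_vowel arr n) := by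
  unfold Pre_repeat_vowel; infer_instance

def pvWitness_repeat_vowel : List String × Int := (["a", "b"], 2)

-- For n == 0 with nonempty arr, A raises RecursionError (the n==1 base case is never
-- reached) while B returns [''], the empty product.
def Raises_repeat_vowel (arr : List String) (n : Int) : Prop := n = 0 ∧ arr ≠ []
instance (arr : List String) (n : Int) : Decidable (Raises_repeat_vowel arr n) := by
  unfold Raises_repeat_vowel; infer_instance
def pvRaiseWitness_repeat_vowel : List String × Int := (["a"], 0)
def pvRaiseWitnessOut_repeat_vowel : List String := [""]

def Spec_repeat_vowel (arr : List String) (n : Int) (out : List String) : Prop := out = repeat_vowel_alt arr n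
instance (arr : List String) (n : Int) (out : List String) : Decidable (Spec_repeat_vowel arr n out) := by unfold Spec_repeat_vowel; infer_instance

-- ===== CLAIM (what is proved, stated in full; the proofs are below) =====
def Claim_equal_repeat_vowel : Prop := ∀ (arr : List String) (n : Int), Dom_repeat_vowel arr n → Pre_repeat_vowel arr n → Spec_repeat_vowel arr n (repeat_vowel arr n)

def Claim_raises_repeat_vowel : Prop := (∀ (arr : List String) (n : Int), Dom_repeat_vowel arr n → Raises_repeat_vowel arr n → ¬ Pre_repeat_vowel arr n) ∧ (Dom_repeat_vowel (pvRaiseWitness_repeat_vowel.1) (pvRaiseWitness_repeat_vowel.2) ∧ Raises_repeat_vowel (pvRaiseWitness_repeat_vowel.1) (pvRaiseWitness_repeat_vowel.2) ∧ repeat_vowel_alt (pvRaiseWitness_repeat_vowel.1) (pvRaiseWitness_repeat_vowel.2) = pvRaiseWitnessOut_repeat_vowel)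

-- ===== LEMMAS AND PROOFS =====

-- fuel-free structural form of the cwr recursion, for the proofs:
-- pvCwrAux f pool is cwr's scan over the pool with f = cwr(·, k-1); pvCwr k pool = cwr(pool, k)
def pvCwrAux (f : List String → List (List String)) : List String → List (List String)
  | [] => []
  | x :: rest => ((f (x :: rest)).map (fun t => x :: t)) ++ pvCwrAux f rest

def pvCwr : Nat → List String → List (List String)
  | 0, _ => [[]]
  | k + 1, pool => pvCwrAux (pvCwr k) pool

-- the fuel is never exhausted for k ≥ 0 with enough of it
lemma pvCwrFuel_eq : ∀ (f : Nat) (k : Nat) (pool : List String), k + pool.length < f →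
    pvCwrFuel f pool (k : Int) = pvCwr k pool := by
  intro f
  induction f with
  | zero => intro k pool h; omega
  | succ f ih =>
      intro k pool h
      cases k with
      | zero => simp [pvCwrFuel, pvCwr]
      | succ k =>
          have hne : ¬ (((k + 1 : Nat) : Int) = 0) := by omega
          cases pool with
          | nil => simp only [pvCwrFuel, if_neg hne, pvCwr, pvCwrAux]
          | cons x rest =>
              have hc : ((k + 1 : Nat) : Int) - 1 = (k : Int) := by omega
              have h1 : k + (x :: rest).length < f := by simp at h ⊢; omega
              have h2 : (k + 1) + rest.length < f := by simp at h ⊢; omega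
              simp only [pvCwrFuel, if_neg hne, hc, ih k (x :: rest) h1,
                ih (k + 1) rest h2, pvCwr, pvCwrAux]

-- ''.join on the char-list side distributes over cons
lemma pvChjoin_nil_cons (a : List Char) (l : List (List Char)) :
    PySem.Chars.join [] (a :: l) = a ++ PySem.Chars.join [] l := by
  cases l with
  | nil => simp [PySem.Chars.join, List.intercalate]
  | cons b t => simp [PySem.Chars.join, List.intercalate]

lemma pvJoin_empty_nil : PySem.Str.join "" ([] : List String) = "" := by
  simp [PySem.Str.join, PySem.Chars.join, List.intercalate]

lemma pvJoin_empty_cons (v : String) (l : List String) :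
    PySem.Str.join "" (v :: l) = v ++ PySem.Str.join "" l := by
  simp [PySem.Str.join, pvChjoin_nil_cons, String.ofList_append]

-- joining singletons gives the list back
lemma pvCwr_one (arr : List String) :
    (pvCwr 1 arr).map (fun t => PySem.Str.join "" t) = arr := by
  induction arr with
  | nil => simp [pvCwr, pvCwrAux]
  | cons x rest ih =>
      simp only [pvCwr, pvCwrAux] at ih ⊢
      simp [ih, pvJoin_empty_cons, pvJoin_empty_nil]

-- pvCwr at k+1, re-expressed in A's shape: choose the first index i, recurse on the suffix
lemma pvCwr_succ (arr : List String) (k : Nat) :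
    pvCwr (k + 1) arr =
      (List.range arr.length).flatMap
        (fun i => (pvCwr k (arr.drop i)).map (fun t => arr.getD i "" :: t)) := by
  induction arr with
  | nil => simp [pvCwr, pvCwrAux]
  | cons x rest ih =>
      simp only [pvCwr, pvCwrAux] at ih ⊢
      simp [List.range_succ_eq_map, List.flatMap_map, ih]

-- main bridge: with enough fuel, A's recursion computes the joined combinations
lemma pvFuel_eq (f : Nat) :
    ∀ (k : Nat) (arr : List String), 1 ≤ k → k ≤ f →
      repeat_vowelFuel f arr (k : Int) = (pvCwr k arr).map (fun t => PySem.Str.join "" t) := by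
  induction f with
  | zero => intro k arr h1 h2; omega
  | succ f ih =>
      intro k arr h1 h2
      by_cases hk1 : k = 1
      · subst hk1
        simp [repeat_vowelFuel, pvCwr_one]
      · have hk2 : 2 ≤ k := by omega
        have hcast : (k : Int) - 1 = ((k - 1 : Nat) : Int) := by omega
        have hne : ¬ ((k : Int) = 1) := by omega
        have ihi : ∀ arr' : List String,
            repeat_vowelFuel f arr' ((k - 1 : Nat) : Int) =
              (pvCwr (k - 1) arr').map (fun t => PySem.Str.join "" t) :=
          fun arr' => ih (k - 1) arr' (by omega) (by omega)
        have hsplit : k = (k - 1) + 1 := by omega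
        rw [hsplit, pvCwr_succ]
        simp only [repeat_vowelFuel, ← hsplit, if_neg hne,
          PySem.List.foldl_append_eq_flatMap, List.nil_append, hcast, ihi]
        simp [List.map_flatMap, List.map_map, Function.comp_def, pvJoin_empty_cons]

-- ===== VERDICT (by name: the statement is the Claim_ definition above) =====
theorem repeat_vowel_spec : Claim_equal_repeat_vowel := by
  intro arr n _ hpre
  have hn1 : 1 ≤ n := hpre
  unfold Spec_repeat_vowel repeat_vowel repeat_vowel_alt
  by_cases h1 : n = 1
  · subst h1; simp [repeat_vowelFuel]
  · rw [if_neg h1]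
    have hfuel : pvCwrFuel (n.toNat + arr.length + 1) arr n = pvCwr n.toNat arr := by
      have h3 := pvCwrFuel_eq (n.toNat + arr.length + 1) n.toNat arr (by omega)
      rwa [Int.toNat_of_nonneg (by omega : (0 : Int) ≤ n)] at h3
    rw [hfuel]
    have hcast : n = ((n.toNat : Nat) : Int) := by omega
    calc repeat_vowelFuel n.toNat arr n
        = repeat_vowelFuel n.toNat arr ((n.toNat : Nat) : Int) := by rw [← hcast]
      _ = (pvCwr n.toNat arr).map (fun t => PySem.Str.join "" t) :=
          pvFuel_eq n.toNat n.toNat arr (by omega) le_rfl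

@[simp]
theorem repeat_vowel_raises : Claim_raises_repeat_vowel := by
  unfold Claim_raises_repeat_vowel
  refine ⟨?_, by decide⟩
  intro arr n _ hr
  simp only [Raises_repeat_vowel] at hr
  simp only [Pre_repeat_vowel]
  omega
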